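-- pv_equiv track=rewrite | github.com/kaiiitlynng/15-112 | other/pracmidterm2.py | greaterThanAppearances
-- ===== SOURCE A (Python) =====
-- def getCounts(d):
--     result = dict()
--     for key in d:
--         if key not in result:
--             result[key] = 1
--         else:
--             result[key] += 1
--     for key in d:
--         value = d[key]
--         if value not in result:
--             result[value] = 1
--         else:
--             result[value] += 1
--     return result
--
-- def greaterThanAppearances(d):
--     #make a counts dict
--     #loop through the dict and return the set
--     counts = getCounts(d)
--     result = set()
--     for key in counts:
--         value = counts[key]
--         if value > abs(key):
--             result.add(key)
--     return result
-- ===== SOURCE B (Python) =====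
-- def greaterThanAppearances(d):
--     # Sort the combined keys+values list once, then count each element as the
--     # difference of its bisect-right and bisect-left positions; no frequency dict.
--     items = list(d) + list(d.values())
--     s = sorted(items)
--
--     def bisect_left(x):
--         lo, hi = 0, len(s)
--         while lo < hi:
--             mid = (lo + hi) // 2
--             if s[mid] < x:
--                 lo = mid + 1
--             else:
--                 hi = mid
--         return lo
--
--     def bisect_right(x):
--         lo, hi = 0, len(s)
--         while lo < hi:
--             mid = (lo + hi) // 2
--             if x < s[mid]:
--                 hi = mid
--             else:
--                 lo = mid + 1
--         return lo
--
--     return {x for x in items if bisect_right(x) - bisect_left(x) > abs(x)}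
-- ===== Notes on version B (the rewrite author's own statement) =====
-- stated objective: alternative
-- what changed: Replaces the hand-built frequency dict and the filter loop over it by sorting the combined keys+values list once and counting each element as the difference of its bisect-right and bisect-left positions inside one set comprehension; it trades the O(n) dict for an O(n log n) sort-and-search.
import Mathlib
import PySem

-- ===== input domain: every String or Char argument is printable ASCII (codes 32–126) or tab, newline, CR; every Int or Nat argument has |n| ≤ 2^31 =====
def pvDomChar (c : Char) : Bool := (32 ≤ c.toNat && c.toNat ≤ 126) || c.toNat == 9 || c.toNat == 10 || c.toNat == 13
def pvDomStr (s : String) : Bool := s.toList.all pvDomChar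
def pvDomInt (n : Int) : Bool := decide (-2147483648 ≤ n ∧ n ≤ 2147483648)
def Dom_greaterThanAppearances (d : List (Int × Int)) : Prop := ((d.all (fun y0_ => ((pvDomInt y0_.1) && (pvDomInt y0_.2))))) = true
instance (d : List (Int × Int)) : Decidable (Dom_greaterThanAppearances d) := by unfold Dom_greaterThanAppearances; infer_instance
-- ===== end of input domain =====

-- B replaces A's hand-built frequency dict and its filter loop by sorting the combined
-- keys+values list once and counting each element via binary search (alternative, not faster).

-- ===== PORT A =====
-- getCounts: two counting loops over the dict's keys (keys once, then each key's value).
-- 'for key in d' iterates the dict's keys (distinct, insertion order = first occurrences);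
-- 'd[key]' is the dict lookup (first match); total here since key comes from d itself.
def pvGetCounts (d : List (Int × Int)) : PySem.Dict Int Int :=
  let ks := PySem.List.dedup (d.map Prod.fst)
  let r1 := ks.foldl (fun r key =>
      if r.contains key = false then r.insert key 1
      else r.insert key (r.getD key 0 + 1)) PySem.Dict.empty
  ks.foldl (fun r key =>
      let value := (PySem.Dict.mk d).getD key 0
      if r.contains value = false then r.insert value 1
      else r.insert value (r.getD value 0 + 1)) r1

def greaterThanAppearances (d : List (Int × Int)) : List Int :=
  let counts := pvGetCounts d
  counts.keys.foldl (fun result key =>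
      let value := counts.getD key 0
      if value > |key| then PySem.Set.add result key else result)
    PySem.Set.empty

-- ===== PORT B =====
-- Source B's hand-written bisect_left/bisect_right loops ('while lo < hi: mid = (lo+hi)//2 …')
-- are exactly PySem.List.bisectLeft/bisectRight (same loop, fuel = len s) — exact.
def greaterThanAppearances_alt (d : List (Int × Int)) : List Int :=
  let ks := PySem.List.dedup (d.map Prod.fst)
  let items := ks ++ ks.map (fun k => (PySem.Dict.mk d).getD k 0)
  let s := PySem.List.sorted items (fun x => x) false
  PySem.Set.ofList (items.filter (fun x =>
    (PySem.List.bisectRight s x : Int) - (PySem.List.bisectLeft s x : Int) > |x|))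

-- ===== PRECONDITION & SPEC =====
def Spec_greaterThanAppearances (d : List (Int × Int)) (out : List Int) : Prop := out = greaterThanAppearances_alt d
instance (d : List (Int × Int)) (out : List Int) : Decidable (Spec_greaterThanAppearances d out) := by unfold Spec_greaterThanAppearances; infer_instance

-- ===== CLAIM (what is proved, stated in full; the proofs are below) =====
def Claim_equal_greaterThanAppearances : Prop := ∀ (d : List (Int × Int)), Dom_greaterThanAppearances d → Spec_greaterThanAppearances d (greaterThanAppearances d)

-- ===== LEMMAS AND PROOFS =====

-- A's branchy counting step is the unconditional counter step.
theorem pv_counter_step {r : PySem.Dict Int Int} {k : Int} :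
    (if r.contains k = false then r.insert k 1 else r.insert k (r.getD k 0 + 1))
      = r.insert k (r.getD k 0 + 1) := by
  by_cases h : r.contains k = false
  · simp [h, PySem.Dict.getD_of_not_contains r 0 h]
  · simp [h]

theorem pv_getCounts_eq (d : List (Int × Int)) :
    pvGetCounts d =
      ((PySem.List.dedup (d.map Prod.fst)
        ++ (PySem.List.dedup (d.map Prod.fst)).map (fun k => (PySem.Dict.mk d).getD k 0)).foldl
        (fun r x => r.insert x (r.getD x 0 + 1)) PySem.Dict.empty) := by
  unfold pvGetCounts
  simp only [pv_counter_step, List.foldl_append, List.foldl_map]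

-- folding Set.add over a Nodup list with a state-independent test is a filter
theorem pv_foldl_add_filter (p : Int → Prop) [DecidablePred p] :
    ∀ (l : List Int) (s : PySem.Set Int), l.Nodup → (∀ x ∈ l, x ∉ s) →
      l.foldl (fun s k => if p k then PySem.Set.add s k else s) s
        = s ++ l.filter (fun k => decide (p k)) := by
  intro l
  induction l with
  | nil => intro s _ _; simp
  | cons k t ih =>
    intro s hnd hdisj
    have hk : k ∉ s := hdisj k (by simp)
    by_cases hp : p k
    · have hadd : PySem.Set.add s k = s ++ [k] := by
        simp [PySem.Set.add, PySem.Set.contains, List.contains_eq_mem, hk]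
      have := ih (s ++ [k]) hnd.of_cons (by
        intro x hx
        simp only [List.mem_append, List.mem_singleton]
        rintro (h | rfl)
        · exact hdisj x (by simp [hx]) h
        · exact (List.nodup_cons.mp hnd).1 hx)
      simp [hp, hadd, this]
    · have := ih s hnd.of_cons (fun x hx => hdisj x (by simp [hx]))
      simp [hp, this]

-- dedup commutes with filter (first occurrences)
theorem pv_ofList_filter (p : Int → Bool) :
    ∀ (xs : List Int), PySem.Set.ofList (xs.filter p) = (PySem.Set.ofList xs).filter p := by
  intro xs
  induction xs with
  | nil => simp
  | cons x t ih =>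
    by_cases hp : p x
    · simp only [List.filter_cons, hp, if_pos, PySem.Set.ofList_cons, ih, PySem.Set.discard]
      simp [List.filter_filter, Bool.and_comm]
    · simp only [List.filter_cons, hp, Bool.false_eq_true, if_false, PySem.Set.ofList_cons,
        PySem.Set.discard, List.filter_filter]
      rw [ih, List.filter_congr]
      intro y _
      rcases eq_or_ne y x with rfl | h
      · simp [hp]
      · simp [h]

-- on a nondecreasing list, count = bisectRight - bisectLeft
theorem pv_bisect_count (s : List Int) (x : Int) (hs : List.Pairwise (· ≤ ·) s) :
    PySem.List.bisectRight s x = PySem.List.bisectLeft s x + s.count x := by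
  obtain ⟨hblN, hblLt, hblGe⟩ := PySem.List.bisectLeft_spec s x hs
  obtain ⟨hbrN, hbrLe, hbrGt⟩ := PySem.List.bisectRight_spec s x hs
  set bl := PySem.List.bisectLeft s x
  set br := PySem.List.bisectRight s x
  have hble : bl ≤ br := by
    by_contra h
    push Not at h
    have hbrlen : br < s.length := lt_of_lt_of_le h hblN
    exact absurd (hblLt br hbrlen h) (not_lt.mpr (le_of_lt (hbrGt br hbrlen le_rfl)))
  have hcount : s.count x = ((s.take br).drop bl).length := by
    have hsplit : s.count x
        = (s.take br).count x + (s.drop br).count x := by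
      conv_lhs => rw [← List.take_append_drop br s]
      exact List.count_append ..
    have hdrop0 : (s.drop br).count x = 0 := by
      rw [List.count_eq_zero]
      intro hmem
      obtain ⟨i, hi, hival⟩ := List.mem_iff_getElem.mp hmem
      have hi' : br + i < s.length := by
        simp only [List.length_drop] at hi; omega
      rw [List.getElem_drop] at hival
      have := hbrGt (br + i) hi' (by omega)
      rw [hival] at this
      exact lt_irrefl x this
    have hsplit2 : (s.take br).count x
        = ((s.take br).take bl).count x + ((s.take br).drop bl).count x := by
      conv_lhs => rw [← List.take_append_drop bl (s.take br)]
      exact List.count_append ..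
    have htake0 : ((s.take br).take bl).count x = 0 := by
      rw [List.count_eq_zero]
      intro hmem
      obtain ⟨i, hi, hival⟩ := List.mem_iff_getElem.mp hmem
      simp only [List.getElem_take] at hival
      have hilen : i < s.length := by
        have := hi
        simp only [List.length_take] at this
        omega
      have hibl : i < bl := by
        have := hi
        simp only [List.length_take] at this
        omega
      have := hblLt i hilen hibl
      rw [hival] at this
      exact lt_irrefl x this
    have hmid : ((s.take br).drop bl).count x = ((s.take br).drop bl).length := by
      rw [List.count_eq_length]
      intro b hmem
      obtain ⟨i, hi, hival⟩ := List.mem_iff_getElem.mp hmem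
      rw [List.getElem_drop, List.getElem_take] at hival
      have hlt : bl + i < br := by
        have := hi
        simp only [List.length_drop, List.length_take] at this
        omega
      have hlen : bl + i < s.length := by
        have := hi
        simp only [List.length_drop, List.length_take] at this
        omega
      have h1 := hbrLe (bl + i) hlen hlt
      have h2 := hblGe (bl + i) hlen (by omega)
      rw [hival] at h1 h2
      exact le_antisymm h2 h1
    omega
  have hlen : ((s.take br).drop bl).length = br - bl := by
    simp only [List.length_drop, List.length_take]
    omega
  omega

-- ===== VERDICT (by name: the statement is the Claim_ definition above) =====
theorem greaterThanAppearances_spec : Claim_equal_greaterThanAppearances := by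
  intro d _
  unfold Spec_greaterThanAppearances greaterThanAppearances greaterThanAppearances_alt
  set ks := PySem.List.dedup (d.map Prod.fst) with hks
  set items := ks ++ ks.map (fun k => (PySem.Dict.mk d).getD k 0) with hitems
  have hcnt : pvGetCounts d = items.foldl (fun r x => r.insert x (r.getD x 0 + 1)) PySem.Dict.empty := by
    rw [pv_getCounts_eq]
  have hkeys : (pvGetCounts d).keys = PySem.Set.ofList items := by
    rw [hcnt, PySem.Dict.keys_foldl_insert]
    simp [PySem.Set.update_nil_left, PySem.Dict.keys_empty]
  have hgetD : ∀ v, (pvGetCounts d).getD v 0 = (items.count v : Int) := by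
    intro v
    rw [hcnt, PySem.Dict.getD_foldl_insert_add_one]
    simp [PySem.Dict.getD_empty]
  simp only [hkeys]
  rw [pv_foldl_add_filter (fun k => (pvGetCounts d).getD k 0 > |k|)
        (PySem.Set.ofList items) PySem.Set.empty (PySem.Set.nodup_ofList items)
        (by intro x _ h; simp [PySem.Set.empty] at h)]
  rw [pv_ofList_filter]
  simp only [PySem.Set.empty, List.nil_append]
  rw [List.filter_congr]
  intro x _
  have hperm : (PySem.List.sorted items (fun x => x) false).Perm items :=
    PySem.List.sorted_perm items (fun x => x) false
  have hpair : List.Pairwise (fun a b : Int => a ≤ b)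
      (PySem.List.sorted items (fun x => x) false) :=
    PySem.List.sorted_pairwise items (fun x => x)
  have hbc := pv_bisect_count (PySem.List.sorted items (fun x => x) false) x hpair
  rw [hperm.count_eq] at hbc
  simp only [← hitems, hgetD x, decide_eq_decide, gt_iff_lt]
  rw [hbc]
  push_cast
  omega
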